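-- pv_equiv track=rewrite | github.com/fedediaz1/facultad | tp03/tp03-02.py | matriz_E
-- ===== SOURCE A (Python) =====
-- def matriz_E(n):
--     matriz = []
--     valor = 1
--     for i in range(n):
--         fila = []
--         for j in range(n):
--             if (i + j) % 2 == 0:
--                 fila.append(0)
--             else:
--                 fila.append(valor)
--                 valor += 1
--         matriz.append(fila)
--     return matriz
-- ===== SOURCE B (Python) =====
-- def matriz_E(n):
--     half = n // 2
--     return [[0 if (i + j) % 2 == 0
--              else 1 + (i // 2) * n + (half + (j + 1) // 2 if i % 2 else j // 2)
--              for j in range(n)]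
--             for i in range(n)]
-- ===== Notes on version B (the rewrite author's own statement) =====
-- stated objective: alternative
-- what changed: Replaced the stateful running counter threaded through nested loops by a closed-form per-cell formula computed directly from (i, j, n), emitted with a stateless nested comprehension.
import Mathlib
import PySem

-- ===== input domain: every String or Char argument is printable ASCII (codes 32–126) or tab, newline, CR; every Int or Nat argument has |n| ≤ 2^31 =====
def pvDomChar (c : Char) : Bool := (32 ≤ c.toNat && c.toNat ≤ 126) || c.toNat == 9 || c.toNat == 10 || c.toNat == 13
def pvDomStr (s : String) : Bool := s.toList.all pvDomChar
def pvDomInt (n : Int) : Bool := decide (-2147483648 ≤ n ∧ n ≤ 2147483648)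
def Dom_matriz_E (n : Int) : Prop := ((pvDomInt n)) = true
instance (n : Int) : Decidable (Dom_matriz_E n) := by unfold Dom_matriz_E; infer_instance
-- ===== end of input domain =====

-- B replaces A's running counter with a closed-form per-cell formula (objective: alternative, stateless cells).

-- ===== PORT A =====
def matriz_E (n : Int) : List (List Int) :=
  let res := (PySem.List.pyRange 0 n 1).foldl
    (fun (st : List (List Int) × Int) i =>
      let inner := (PySem.List.pyRange 0 n 1).foldl
        (fun (fs : List Int × Int) j =>
          if PySem.Int.mod (i + j) 2 = 0 then (fs.1 ++ [0], fs.2)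
          else (fs.1 ++ [fs.2], fs.2 + 1))
        ([], st.2)
      (st.1 ++ [inner.1], inner.2))
    ([], 1)
  res.1

-- ===== PORT B =====
def matriz_E_alt (n : Int) : List (List Int) :=
  let half := PySem.Int.floordiv n 2
  (PySem.List.pyRange 0 n 1).map fun i =>
    (PySem.List.pyRange 0 n 1).map fun j =>
      if PySem.Int.mod (i + j) 2 = 0 then 0
      else 1 + PySem.Int.floordiv i 2 * n +
        (if PySem.Int.mod i 2 ≠ 0 then half + PySem.Int.floordiv (j + 1) 2
         else PySem.Int.floordiv j 2)

-- ===== PRECONDITION & SPEC =====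
def Spec_matriz_E (n : Int) (out : List (List Int)) : Prop := out = matriz_E_alt n
instance (n : Int) (out : List (List Int)) : Decidable (Spec_matriz_E n out) := by unfold Spec_matriz_E; infer_instance

-- ===== CLAIM (what is proved, stated in full; the proofs are below) =====
def Claim_equal_matriz_E : Prop := ∀ (n : Int), Dom_matriz_E n → Spec_matriz_E n (matriz_E n)

-- ===== LEMMAS AND PROOFS =====

-- [0, 1, …, m-1] as integers
def pvNats (m : Nat) : List Int := (List.range m).map (fun k : Nat => (k : Int))

-- number of odd-(i+j') cells with j' < k in row i
def pvPref (i : Int) (k : Nat) : Int :=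
  ((List.range k).countP (fun j : Nat => !(PySem.Int.mod (i + (j : Int)) 2 == 0)) : Int)

-- total number of odd cells in rows 0..r-1 (rows of length N)
def pvTot (N : Nat) : Nat → Int
  | 0 => 0
  | r + 1 => pvTot N r + pvPref (r : Int) N

theorem pvNats_succ (m : Nat) : pvNats (m + 1) = pvNats m ++ [(m : Int)] := by
  simp [pvNats, List.range_succ]

theorem pvRange_eq_pvNats (n : Int) :
    PySem.List.pyRange 0 n 1 = pvNats n.toNat := by
  rw [PySem.List.pyRange_one]
  simp [pvNats]

theorem pvPref_succ (i : Int) (m : Nat) :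
    pvPref i (m + 1) = pvPref i m + (if PySem.Int.mod (i + (m : Int)) 2 = 0 then 0 else 1) := by
  rw [pvPref, pvPref, List.range_succ, List.countP_append]
  by_cases h : (i + (m : Int)) % 2 = 0
  · simp [h]
  · simp [h]

theorem pvPref_closed (i : Int) (k : Nat) :
    pvPref i k = if i % 2 = 0 then ((k : Int)) / 2 else ((k : Int) + 1) / 2 := by
  induction k with
  | zero => simp [pvPref]
  | succ k ih =>
    rw [pvPref_succ, ih, PySem.Int.mod_eq_emod_of_pos (by omega : (0:Int) < 2)]
    have hc : ((k + 1 : Nat) : Int) = (k : Int) + 1 := by push_cast; ring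
    rw [hc]
    by_cases h : i % 2 = 0 <;> simp [h] <;> omega

theorem pvTot_closed (N r : Nat) :
    pvTot N r = ((r : Int)) / 2 * (N : Int) + (if (r : Int) % 2 = 0 then 0 else (N : Int) / 2) := by
  induction r with
  | zero => simp [pvTot]
  | succ r ih =>
    rw [pvTot, ih, pvPref_closed _ N]
    have hc : ((r + 1 : Nat) : Int) = (r : Int) + 1 := by push_cast; ring
    rw [hc]
    by_cases h : (r : Int) % 2 = 0
    · have e1 : ((r : Int) + 1) % 2 ≠ 0 := by omega
      have e3 : ((r : Int) + 1) / 2 = (r : Int) / 2 := by omega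
      rw [e3]
      simp only [h, if_true, e1, if_false]
      omega
    · have e1 : ((r : Int) + 1) % 2 = 0 := by omega
      have e3 : ((r : Int) + 1) / 2 = (r : Int) / 2 + 1 := by omega
      rw [e3]
      simp only [h, if_false, e1, if_true]
      have e4 : ((r : Int) / 2 + 1) * (N : Int) = (r : Int) / 2 * (N : Int) + (N : Int) := by ring
      rw [e4]
      omega

theorem pvInner (i v : Int) (acc : List Int) (m : Nat) :
    (pvNats m).foldl
      (fun (fs : List Int × Int) j =>
        if PySem.Int.mod (i + j) 2 = 0 then (fs.1 ++ [0], fs.2)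
        else (fs.1 ++ [fs.2], fs.2 + 1)) (acc, v)
    = (acc ++ (List.range m).map
        (fun k : Nat => if PySem.Int.mod (i + (k : Int)) 2 = 0 then 0 else v + pvPref i k),
       v + pvPref i m) := by
  induction m with
  | zero => simp [pvNats, pvPref]
  | succ m ih =>
    rw [pvNats_succ, List.foldl_append, ih, List.range_succ, List.map_append]
    simp only [List.foldl_cons, List.foldl_nil, List.map_cons, List.map_nil]
    rw [pvPref_succ]
    by_cases h : PySem.Int.mod (i + (m : Int)) 2 = 0
    · rw [if_pos h, if_pos h, if_pos h]
      simp [List.append_assoc]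
    · rw [if_neg h, if_neg h, if_neg h]
      simp [List.append_assoc]
      ring

theorem pvOuter (N r : Nat) :
    (pvNats r).foldl
      (fun (st : List (List Int) × Int) i =>
        let inner := (pvNats N).foldl
          (fun (fs : List Int × Int) j =>
            if PySem.Int.mod (i + j) 2 = 0 then (fs.1 ++ [0], fs.2)
            else (fs.1 ++ [fs.2], fs.2 + 1))
          ([], st.2)
        (st.1 ++ [inner.1], inner.2))
      ([], 1)
    = ((List.range r).map (fun i : Nat => (List.range N).map
        (fun k : Nat => if PySem.Int.mod ((i : Int) + (k : Int)) 2 = 0 then 0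
                  else 1 + pvTot N i + pvPref (i : Int) k)),
       1 + pvTot N r) := by
  induction r with
  | zero => simp [pvNats, pvTot]
  | succ r ih =>
    rw [pvNats_succ, List.foldl_append, ih]
    simp only [List.foldl_cons, List.foldl_nil, pvInner, List.range_succ, List.map_append]
    simp [pvTot, add_assoc]

theorem pvCell (n : Int) (i k : Nat) (hn : 0 ≤ n) :
    1 + pvTot n.toNat i + pvPref (i : Int) k =
      1 + PySem.Int.floordiv (i : Int) 2 * n +
        (if PySem.Int.mod (i : Int) 2 ≠ 0 then PySem.Int.floordiv n 2 + PySem.Int.floordiv ((k : Int) + 1) 2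
         else PySem.Int.floordiv (k : Int) 2) := by
  rw [pvTot_closed, pvPref_closed _ k,
    PySem.Int.floordiv_eq_ediv_of_pos (a := (i : Int)) (by omega),
    PySem.Int.floordiv_eq_ediv_of_pos (a := n) (by omega),
    PySem.Int.floordiv_eq_ediv_of_pos (a := (k : Int) + 1) (by omega),
    PySem.Int.floordiv_eq_ediv_of_pos (a := (k : Int)) (by omega),
    PySem.Int.mod_eq_emod_of_pos (by omega : (0:Int) < 2),
    show ((n.toNat : Int)) = n by omega]
  split_ifs <;> omega

-- ===== VERDICT (by name: the statement is the Claim_ definition above) =====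
theorem matriz_E_spec : Claim_equal_matriz_E := by
  intro n _
  unfold Spec_matriz_E
  by_cases hn : n ≤ 0
  · unfold matriz_E matriz_E_alt
    simp [PySem.List.pyRange_one_eq_nil hn]
  · have hn' : 0 ≤ n := by omega
    have hA : matriz_E n =
        ((pvNats n.toNat).foldl
          (fun (st : List (List Int) × Int) i =>
            let inner := (pvNats n.toNat).foldl
              (fun (fs : List Int × Int) j =>
                if PySem.Int.mod (i + j) 2 = 0 then (fs.1 ++ [0], fs.2)
                else (fs.1 ++ [fs.2], fs.2 + 1))
              ([], st.2)
            (st.1 ++ [inner.1], inner.2))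
          ([], 1)).1 := by
      unfold matriz_E
      rw [pvRange_eq_pvNats n]
    have hB : matriz_E_alt n =
        (pvNats n.toNat).map fun i =>
          (pvNats n.toNat).map fun j =>
            if PySem.Int.mod (i + j) 2 = 0 then 0
            else 1 + PySem.Int.floordiv i 2 * n +
              (if PySem.Int.mod i 2 ≠ 0 then PySem.Int.floordiv n 2 + PySem.Int.floordiv (j + 1) 2
               else PySem.Int.floordiv j 2) := by
      unfold matriz_E_alt
      rw [pvRange_eq_pvNats n]
    rw [hA, hB, pvOuter]
    simp only [pvNats, List.map_map]
    apply List.map_congr_left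
    intro i _
    simp only [Function.comp_apply]
    apply List.map_congr_left
    intro k _
    simp only [Function.comp_apply]
    by_cases h : PySem.Int.mod ((i : Int) + (k : Int)) 2 = 0
    · rw [if_pos h, if_pos h]
    · rw [if_neg h, if_neg h, pvCell n i k hn']
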